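-- pv_equiv track=rewrite | github.com/RavenHex1296/games | checkers/players/reduced_depth_game_tree.py | reduce_board
-- ===== SOURCE A (Python) =====
-- def reduce_board(board):
--     reduced_board = []
--
--     for i in range(0, len(board)):
--         for j in range(0, len(board[i])):
--             piece = board[i][j]
--             assert abs(piece) <= 3, "Board values too large"
--
--             if i % 2 == 0:
--                 if j % 2 == 1:
--                     reduced_board.append(board[i][j])
--
--             if i % 2 == 1:
--                 if j % 2 == 0:
--                     reduced_board.append(board[i][j])
--
--     return reduced_board
-- ===== SOURCE B (Python) =====
-- def reduce_board(board):
--     for row in board: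
--         for piece in row:
--             assert abs(piece) <= 3, "Board values too large"
--
--     result = []
--     for i, row in enumerate(board):
--         result.extend(row[1::2] if i % 2 == 0 else row[0::2])
--     return result
-- ===== Notes on version B (the rewrite author's own statement) =====
-- stated objective: alternative
-- what changed: Replaces the single nested index loop with a per-cell parity branch by two passes: a pure validation pass over all pieces, then a collection pass that appends the strided slice row[1::2] for even row indices and row[0::2] for odd ones.
import Mathlib
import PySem

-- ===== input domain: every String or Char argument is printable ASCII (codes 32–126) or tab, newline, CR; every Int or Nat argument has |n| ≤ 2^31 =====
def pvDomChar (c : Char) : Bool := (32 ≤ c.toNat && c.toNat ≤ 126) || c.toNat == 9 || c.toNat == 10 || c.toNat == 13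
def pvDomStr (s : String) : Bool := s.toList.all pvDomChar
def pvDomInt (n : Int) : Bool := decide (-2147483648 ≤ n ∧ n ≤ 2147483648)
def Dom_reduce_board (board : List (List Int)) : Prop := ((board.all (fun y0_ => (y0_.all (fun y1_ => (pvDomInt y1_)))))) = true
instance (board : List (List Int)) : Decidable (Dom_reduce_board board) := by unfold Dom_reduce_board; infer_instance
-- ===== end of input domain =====

-- B separates validation (one pass of asserts) from collection (per-row strided slices
-- row[1::2] / row[0::2] by row parity) instead of A's per-cell parity branch (objective: alternative).


-- ===== PORT A =====
-- A's assert raises exactly outside Pre_reduce_board; under Pre_ it is a no-op, so it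
-- contributes nothing to the returned value.
def reduce_board (board : List (List Int)) : List Int :=
  (PySem.List.pyRange 0 (PySem.List.len board) 1).foldl
    (fun reduced i =>
      (PySem.List.pyRange 0 (PySem.List.len (PySem.List.pyGetD board i [])) 1).foldl
        (fun acc j =>
          let piece := PySem.List.pyGetD (PySem.List.pyGetD board i []) j 0
          let acc1 := if PySem.Int.mod i 2 = 0 then
                        (if PySem.Int.mod j 2 = 1 then acc ++ [piece] else acc)
                      else acc
          if PySem.Int.mod i 2 = 1 then
            (if PySem.Int.mod j 2 = 0 then acc1 ++ [piece] else acc1)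
          else acc1)
        reduced)
    []

-- ===== PORT B =====
-- B's validation pass only asserts (it raises exactly outside Pre_reduce_board, like A) and
-- produces no value, so only the collection pass has computational content to port.
def reduce_board_alt (board : List (List Int)) : List Int :=
  (PySem.List.enumerate board 0).foldl
    (fun result p =>
      result ++ (if PySem.Int.mod p.1 2 = 0
                 then (PySem.List.slice? p.2 (some 1) none 2).getD []
                 else (PySem.List.slice? p.2 (some 0) none 2).getD []))
    []

-- ===== PRECONDITION & SPEC =====
-- Pre_ excludes exactly the boards on which A's assert raises AssertionError (some |piece| > 3).
def Pre_reduce_board (board : List (List Int)) : Prop :=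
  ∀ row ∈ board, ∀ p ∈ row, p.natAbs ≤ 3
instance (board : List (List Int)) : Decidable (Pre_reduce_board board) := by
  unfold Pre_reduce_board; infer_instance
def pvWitness_reduce_board : List (List Int) := [[1, -2, 0], [3, 0, -3], [2, 1, 2]]

def Spec_reduce_board (board : List (List Int)) (out : List Int) : Prop := out = reduce_board_alt board
instance (board : List (List Int)) (out : List Int) : Decidable (Spec_reduce_board board out) := by unfold Spec_reduce_board; infer_instance

-- ===== CLAIM (what is proved, stated in full; the proofs are below) =====
def Claim_equal_reduce_board : Prop := ∀ (board : List (List Int)), Dom_reduce_board board → Pre_reduce_board board → Spec_reduce_board board (reduce_board board)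

-- ===== LEMMAS AND PROOFS =====

-- elements at even indices (what row[0::2] selects)
def pvEvens : List Int → List Int
  | [] => []
  | [x] => [x]
  | x :: _ :: t => x :: pvEvens t

-- elements at positions m with (s+m) odd
def pvSel : Nat → List Int → List Int
  | _, [] => []
  | s, x :: t => if s % 2 = 1 then x :: pvSel (s+1) t else pvSel (s+1) t

-- the cells with (i+j) odd, row indices starting at s
def pvCollect : Nat → List (List Int) → List Int
  | _, [] => []
  | s, row :: rest => pvSel s row ++ pvCollect (s+1) rest

lemma pvMod2 (m : Nat) : PySem.Int.mod (m : Int) 2 = ((m % 2 : Nat) : Int) := by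
  exact_mod_cast PySem.Int.mod_natCast m 2

lemma pvEvens_cons (x : Int) (t : List Int) : pvEvens (x :: t) = x :: pvEvens t.tail := by
  cases t <;> simp [pvEvens]

lemma pvSel_parity : ∀ (l : List Int) (s t : Nat), s % 2 = t % 2 → pvSel s l = pvSel t l := by
  intro l
  induction l with
  | nil => intro s t _; rfl
  | cons x r ih =>
    intro s t h
    simp only [pvSel, h]
    rw [ih (s+1) (t+1) (by omega)]

lemma pvSel_one_zero : ∀ (l : List Int), pvSel 1 l = pvEvens l ∧ pvSel 0 l = pvEvens l.tail := by
  intro l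
  induction l with
  | nil => exact ⟨rfl, rfl⟩
  | cons x t ih =>
    constructor
    · show (if 1 % 2 = 1 then x :: pvSel 2 t else pvSel 2 t) = pvEvens (x :: t)
      rw [if_pos (by omega), pvSel_parity t 2 0 (by omega), ih.2, pvEvens_cons]
    · show (if 0 % 2 = 1 then x :: pvSel 1 t else pvSel 1 t) = pvEvens (x :: t).tail
      rw [if_neg (by omega), ih.1]; rfl

lemma pvSel_mod (s : Nat) (l : List Int) :
    pvSel s l = if s % 2 = 0 then pvEvens l.tail else pvEvens l := by
  split_ifs with h
  · rw [pvSel_parity l s 0 (by omega)]; exact (pvSel_one_zero l).2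
  · rw [pvSel_parity l s 1 (by omega)]; exact (pvSel_one_zero l).1

lemma pvFmEvens : ∀ (l : List Int),
    (List.range ((l.length+1)/2)).filterMap (fun k => l[2*k]?) = pvEvens l := by
  intro l
  induction l using pvEvens.induct with
  | case1 => simp [pvEvens]
  | case2 x => simp [pvEvens, List.range_succ]
  | case3 x y t ih =>
    have hlen : ((x :: y :: t).length + 1) / 2 = ((t.length + 1) / 2) + 1 := by
      simp; omega
    rw [hlen, List.range_succ_eq_map, List.filterMap_cons, List.filterMap_map]
    simp only [Function.comp]
    have hshift : (List.filterMap (fun k => (x :: y :: t)[2 * Nat.succ k]?) (List.range ((t.length+1)/2)))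
        = List.filterMap (fun k => t[2*k]?) (List.range ((t.length+1)/2)) := by
      apply List.filterMap_congr
      intro k _
      have h2 : 2 * Nat.succ k = (2*k) + 1 + 1 := by omega
      rw [h2]
      simp
    rw [hshift, ih]
    simp [pvEvens]

lemma pvSlice_zero (l : List Int) : (PySem.List.slice? l (some 0) none 2).getD [] = pvEvens l := by
  simp only [PySem.List.slice?, PySem.List.sliceIndices]
  norm_num
  have hcount : (if 0 < l.length then (((l.length:Int) + 2 - 1) / 2).toNat else 0)
      = (l.length + 1) / 2 := by
    split_ifs with h <;> omega
  rw [hcount, show (fun (x:Nat) => l[(2 * (x:Int)).toNat]?) = fun (k:Nat) => l[2*k]? by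
    funext k; congr 1]
  exact pvFmEvens l

lemma pvSlice_one (l : List Int) : (PySem.List.slice? l (some 1) none 2).getD [] = pvEvens l.tail := by
  simp only [PySem.List.slice?, PySem.List.sliceIndices]
  norm_num
  cases l with
  | nil => simp [pvEvens]
  | cons x t =>
    have hc : (if 1 < (x::t).length then ((((x::t).length:Int) - min 1 ((x::t).length:Int) + 2 - 1) / 2).toNat else 0)
        = (t.length + 1) / 2 := by
      simp only [List.length_cons]
      split_ifs with h <;> push_cast <;> omega
    rw [hc, show (fun (k:Nat) => (x::t)[(min 1 (((x::t).length:Int)) + 2 * (k:Int)).toNat]?)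
        = fun (k:Nat) => t[2*k]? by
      funext k
      have hidx : (min 1 (((x::t).length:Int)) + 2 * (k:Int)).toNat = 2*k + 1 := by
        simp only [List.length_cons]; push_cast; omega
      rw [hidx, List.getElem?_cons_succ]]
    simpa using pvFmEvens t

-- A's inner loop over one row collects exactly the parity-selected cells
lemma pvInner : ∀ (row : List Int) (k j0 : Nat) (acc : List Int),
    (List.range row.length).foldl
      (fun a m =>
        let piece := row.getD m 0
        let a1 := if k % 2 = 0 then (if (j0 + m) % 2 = 1 then a ++ [piece] else a) else a
        if k % 2 = 1 then (if (j0 + m) % 2 = 0 then a1 ++ [piece] else a1) else a1) acc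
    = acc ++ pvSel (k + j0) row := by
  intro row
  induction row with
  | nil => intro k j0 acc; simp [pvSel]
  | cons x t ih =>
    intro k j0 acc
    rw [List.length_cons, List.range_succ_eq_map, List.foldl_cons, List.foldl_map]
    have hfun : (fun (a : List Int) (m : Nat) =>
        let piece := (x :: t).getD (Nat.succ m) 0
        let a1 := if k % 2 = 0 then (if (j0 + Nat.succ m) % 2 = 1 then a ++ [piece] else a) else a
        if k % 2 = 1 then (if (j0 + Nat.succ m) % 2 = 0 then a1 ++ [piece] else a1) else a1)
        = (fun (a : List Int) (m : Nat) =>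
        let piece := t.getD m 0
        let a1 := if k % 2 = 0 then (if ((j0+1) + m) % 2 = 1 then a ++ [piece] else a) else a
        if k % 2 = 1 then (if ((j0+1) + m) % 2 = 0 then a1 ++ [piece] else a1) else a1) := by
      funext a m
      have h1 : j0 + Nat.succ m = (j0 + 1) + m := by omega
      rw [h1, List.getD_cons_succ]
    rw [hfun, ih k (j0+1)]
    have hsh : k + (j0 + 1) = k + j0 + 1 := by omega
    rw [hsh]
    have hsel : pvSel (k + j0) (x :: t)
        = (if (k + j0) % 2 = 1 then x :: pvSel (k + j0 + 1) t else pvSel (k + j0 + 1) t) := rfl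
    rw [hsel]
    dsimp only
    simp only [List.getD_cons_zero, Nat.add_zero]
    split_ifs <;> first | rfl | omega | simp

-- A's outer loop: fold of per-row selections is pvCollect
lemma pvOuterA : ∀ (bd : List (List Int)) (s : Nat) (acc : List Int),
    (List.range bd.length).foldl (fun a k => a ++ pvSel (s + k) (bd.getD k [])) acc
    = acc ++ pvCollect s bd := by
  intro bd
  induction bd with
  | nil => intro s acc; simp [pvCollect]
  | cons row rest ih =>
    intro s acc
    rw [List.length_cons, List.range_succ_eq_map, List.foldl_cons, List.foldl_map]
    have hfun : (fun (a : List Int) (k : Nat) => a ++ pvSel (s + Nat.succ k) ((row :: rest).getD (Nat.succ k) []))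
        = (fun (a : List Int) (k : Nat) => a ++ pvSel ((s+1) + k) (rest.getD k [])) := by
      funext a k
      have h1 : s + Nat.succ k = (s + 1) + k := by omega
      rw [h1, List.getD_cons_succ]
    rw [hfun, ih (s+1)]
    simp [pvCollect]

-- B's fold over enumerate is the same pvCollect
lemma pvOuterB : ∀ (bd : List (List Int)) (s : Nat) (acc : List Int),
    (PySem.List.enumerate bd (s : Int)).foldl
      (fun result p =>
        result ++ (if PySem.Int.mod p.1 2 = 0 then pvEvens p.2.tail else pvEvens p.2)) acc
    = acc ++ pvCollect s bd := by
  intro bd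
  induction bd with
  | nil => intro s acc; simp [PySem.List.enumerate, pvCollect]
  | cons row rest ih =>
    intro s acc
    have henum : PySem.List.enumerate (row :: rest) (s : Int)
        = ((s : Int), row) :: PySem.List.enumerate rest ((s : Int) + 1) := rfl
    rw [henum, List.foldl_cons]
    have hcast : ((s : Int) + 1) = (((s + 1 : Nat)) : Int) := by push_cast; ring
    rw [hcast, ih (s+1)]
    have hstep : (if PySem.Int.mod (s : Int) 2 = 0 then pvEvens row.tail else pvEvens row)
        = pvSel s row := by
      rw [pvSel_mod, pvMod2]
      by_cases h : s % 2 = 0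
      · rw [if_pos h, if_pos (by exact_mod_cast congrArg (Nat.cast : Nat → Int) h)]
      · rw [if_neg h, if_neg (by exact_mod_cast fun hh => h (by exact_mod_cast hh))]
    rw [hstep]
    simp [pvCollect]

-- A's port reduces to pvCollect 0
lemma pvA_eq (bd : List (List Int)) : reduce_board bd = pvCollect 0 bd := by
  unfold reduce_board
  simp only [PySem.List.len_eq, PySem.List.pyRange_zero_natCast, List.foldl_map,
    PySem.List.pyGetD_natCast, pvMod2, Nat.cast_eq_zero, Nat.cast_eq_one]
  have hb : (fun (reduced : List Int) (k : Nat) =>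
      (List.range (bd.getD k []).length).foldl
        (fun a m =>
          let piece := (bd.getD k []).getD m 0
          let a1 := if k % 2 = 0 then (if m % 2 = 1 then a ++ [piece] else a) else a
          if k % 2 = 1 then (if m % 2 = 0 then a1 ++ [piece] else a1) else a1) reduced)
      = (fun (a : List Int) (k : Nat) => a ++ pvSel (0 + k) (bd.getD k [])) := by
    funext a k
    have := pvInner (bd.getD k []) k 0 a
    simpa [Nat.add_zero, Nat.zero_add] using this
  rw [hb, pvOuterA bd 0 []]
  rfl

-- B's port reduces to pvCollect 0
lemma pvB_eq (bd : List (List Int)) : reduce_board_alt bd = pvCollect 0 bd := by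
  unfold reduce_board_alt
  have hb : (fun (result : List Int) (p : Int × List Int) =>
      result ++ (if PySem.Int.mod p.1 2 = 0
                 then (PySem.List.slice? p.2 (some 1) none 2).getD []
                 else (PySem.List.slice? p.2 (some 0) none 2).getD []))
      = (fun (result : List Int) (p : Int × List Int) =>
      result ++ (if PySem.Int.mod p.1 2 = 0 then pvEvens p.2.tail else pvEvens p.2)) := by
    funext r p
    rw [pvSlice_one, pvSlice_zero]
  rw [hb]
  simpa using pvOuterB bd 0 []

-- ===== VERDICT (by name: the statement is the Claim_ definition above) =====
theorem reduce_board_spec : Claim_equal_reduce_board := by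
  intro board _ _
  unfold Spec_reduce_board
  rw [pvA_eq, pvB_eq]
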